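-- pv_equiv track=rewrite | github.com/heyitskevin/adventofcode | 2023/day_14/2.py | big_cycle
-- ===== SOURCE A (Python) =====
-- def transpose(arr):
--     # short circuits at shortest nested list if table is jagged:
--     return list(map(list, zip(*arr)))
--
-- def tilt_array_north(arr):
--     copy_arr = [['.' for _ in range(len(arr[0]))] for __ in range(len(arr))]
--
--     for column_index in range(len(arr[0])):
--         current_base = 0
--         for row_index in range(len(arr)):
--             element = arr[row_index][column_index]
--             if element == 'O':
--                 copy_arr[current_base][column_index] = element
--                 current_base += 1
--             elif element == '#':
--                 current_base = row_index + 1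
--                 copy_arr[row_index][column_index] = element
--     return copy_arr
--
-- def tilt_array_south(arr):
--     flipped = arr[::-1]
--     new_arr = tilt_array_north(flipped)
--     return new_arr[::-1]
--
-- def tilt_array_east(arr):
--     turned = transpose(arr)
--     new_arr = tilt_array_south(turned)
--     return transpose(new_arr)
--
-- def tilt_array_west(arr):
--     turned = transpose(arr)
--     new_arr = tilt_array_north(turned)
--     return transpose(new_arr)
--
-- def cycle(arr):
--     return tilt_array_east(
--         tilt_array_south(
--             tilt_array_west(
--                 tilt_array_north(arr)
--             )
--         )
--     )
--
-- def stringify(arr):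
--     return '\n'.join([''.join([rr for rr in row]) for row in arr])
--
-- def big_cycle(arr):
--     position = arr
--     s_pos = stringify(position)
--     visited = {} # position, counter
--     visited[s_pos] = 0
--     for i in range(1, 10000000001):
--         position = cycle(position)
--         stringed = stringify(position)
--         if stringed in visited:
--             return position, visited[stringed], i, visited
--         else:
--             visited[stringed] = i
-- ===== SOURCE B (Python) =====
-- def tilt_column(col):
--     out = []
--     rocks = 0
--     gaps = 0
--     for x in col:
--         if x == '#':
--             out += ['O'] * rocks + ['.'] * gaps + ['#']
--             rocks = 0
--             gaps = 0
--         elif x == 'O':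
--             rocks += 1
--         else:
--             gaps += 1
--     out += ['O'] * rocks + ['.'] * gaps
--     return out
--
--
-- def tilt_north(arr):
--     w = len(arr[0])
--     h = len(arr)
--     cols = [tilt_column([arr[i][j] for i in range(h)]) for j in range(w)]
--     return [[cols[j][i] for j in range(w)] for i in range(h)]
--
--
-- def rotate_cw(arr):
--     return [list(row) for row in zip(*arr[::-1])]
--
--
-- def cycle(arr):
--     pos = arr
--     for _ in range(4):
--         pos = rotate_cw(tilt_north(pos))
--     return pos
--
--
-- def stringify(arr):
--     return '\n'.join([''.join([rr for rr in row]) for row in arr])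
--
--
-- def big_cycle(arr):
--     position = arr
--     s_pos = stringify(position)
--     visited = {}
--     visited[s_pos] = 0
--     for i in range(1, 10000000001):
--         position = cycle(position)
--         stringed = stringify(position)
--         if stringed in visited:
--             return position, visited[stringed], i, visited
--         else:
--             visited[stringed] = i
-- ===== Notes on version B (the rewrite author's own statement) =====
-- stated objective: alternative
-- what changed: The per-cycle transformation is rebuilt: tilt-north is computed per column by run-length repacking (count rocks/gaps, emit segments at each '#') instead of positional writes into a preallocated 2D grid, and one spin cycle is rotate-90-clockwise-then-tilt-north applied four times instead of A's transpose/flip conjugations of the grid-writing tilt.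
import Mathlib
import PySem

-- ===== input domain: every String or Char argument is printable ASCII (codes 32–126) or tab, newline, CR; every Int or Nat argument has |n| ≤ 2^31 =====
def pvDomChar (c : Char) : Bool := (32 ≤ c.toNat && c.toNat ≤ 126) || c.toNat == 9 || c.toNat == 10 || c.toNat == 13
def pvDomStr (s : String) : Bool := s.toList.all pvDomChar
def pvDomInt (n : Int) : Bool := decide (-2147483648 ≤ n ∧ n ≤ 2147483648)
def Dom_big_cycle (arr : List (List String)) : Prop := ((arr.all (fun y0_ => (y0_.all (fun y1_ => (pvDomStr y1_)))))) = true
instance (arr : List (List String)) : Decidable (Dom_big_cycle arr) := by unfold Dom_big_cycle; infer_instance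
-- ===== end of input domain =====

-- B rewrites the spin-cycle step as rotate-90°-then-tilt-north with per-column run-length
-- repacking, instead of A's transpose/flip conjugations of a positional-write tilt; the
-- cycle-detection loop is proved to return identical results (alternative decomposition).


-- ===== PORT A =====
-- arr[row][col]; in-range on every admitted input (out-of-range raises in Python, excluded by Pre_)
def pvCell (arr : List (List String)) (i j : Nat) : String := (arr.getD i []).getD j "."

-- zip(*arr) : truncates at the shortest row; [] when arr = []
def transposeP (arr : List (List String)) : List (List String) :=
  match arr with
  | [] => []
  | r :: rest =>
    if h : (r :: rest).any (fun x => x.isEmpty) then []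
    else ((r :: rest).map (fun x => x.headD "")) :: transposeP ((r :: rest).map (fun x => x.tail))
termination_by (arr.headD []).length
decreasing_by
  simp only [List.any_cons, Bool.or_eq_true, List.isEmpty_iff, not_or] at h
  simp only [List.map_cons, List.headD_cons]
  cases r with
  | nil => exact absurd rfl h.1
  | cons a as => simp

-- the body of A's inner row loop (writes into the preallocated copy grid)
def tiltNstep (arr : List (List String)) (c : Nat) (st : Nat × List (List String)) (r : Nat) :
    Nat × List (List String) :=
  let e := pvCell arr r c
  if e = "O" then (st.1 + 1, st.2.modify st.1 (fun row => row.set c "O"))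
  else if e = "#" then (r + 1, st.2.modify r (fun row => row.set c "#"))
  else st

def tiltN_A (arr : List (List String)) : List (List String) :=
  let h := arr.length
  let w := (arr.headD []).length   -- len(arr[0]); Python raises on [], excluded by Pre_
  (List.range w).foldl
    (fun cp c => ((List.range h).foldl (tiltNstep arr c) (0, cp)).2)
    (List.replicate h (List.replicate w "."))

def tiltS_A (arr : List (List String)) : List (List String) :=
  (tiltN_A arr.reverse).reverse

def tiltW_A (arr : List (List String)) : List (List String) :=
  transposeP (tiltN_A (transposeP arr))

def tiltE_A (arr : List (List String)) : List (List String) :=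
  transposeP (tiltS_A (transposeP arr))

def cycleA (arr : List (List String)) : List (List String) :=
  tiltE_A (tiltS_A (tiltW_A (tiltN_A arr)))

def pvStringify (arr : List (List String)) : String :=
  PySem.Str.join "\n" (arr.map (fun row => PySem.Str.join "" row))

def pvLoopA : Nat → Int → List (List String) → PySem.Dict String Int →
    List (List String) × Int × Int × List (String × Int)
  | 0, _, pos, visited => (pos, 0, 0, visited.items)   -- fuel 10^10 exhausted (Python falls off the loop)
  | fuel + 1, i, pos, visited =>
    let pos' := cycleA pos
    let s := pvStringify pos'
    match visited.get? s with
    | some v => (pos', v, i, visited.items)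
    | none => pvLoopA fuel (i + 1) pos' (visited.insert s i)

def big_cycle (arr : List (List String)) : List (List String) × Int × Int × (List (String × Int)) :=
  pvLoopA 10000000000 1 arr (PySem.Dict.empty.insert (pvStringify arr) 0)

-- ===== PORT B =====
-- run-length repacking of one column: count rocks and gaps, flush at each '#'
def tiltColStep (st : List String × Nat × Nat) (x : String) : List String × Nat × Nat :=
  if x = "#" then (st.1 ++ List.replicate st.2.1 "O" ++ List.replicate st.2.2 "." ++ ["#"], 0, 0)
  else if x = "O" then (st.1, st.2.1 + 1, st.2.2)
  else (st.1, st.2.1, st.2.2 + 1)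

def tiltCol (col : List String) : List String :=
  let st := col.foldl tiltColStep ([], 0, 0)
  st.1 ++ List.replicate st.2.1 "O" ++ List.replicate st.2.2 "."

def tiltN_B (arr : List (List String)) : List (List String) :=
  let h := arr.length
  let w := (arr.headD []).length   -- len(arr[0]); Python raises on [], excluded by Pre_
  let cols := (List.range w).map (fun j => tiltCol ((List.range h).map (fun i => pvCell arr i j)))
  (List.range h).map (fun i => (List.range w).map (fun j => (cols.getD j []).getD i "."))

-- zip(*arr[::-1])
def rotCW (arr : List (List String)) : List (List String) := transposeP arr.reverse

def cycleB (arr : List (List String)) : List (List String) :=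
  (List.range 4).foldl (fun pos _ => rotCW (tiltN_B pos)) arr

def pvLoopB : Nat → Int → List (List String) → PySem.Dict String Int →
    List (List String) × Int × Int × List (String × Int)
  | 0, _, pos, visited => (pos, 0, 0, visited.items)
  | fuel + 1, i, pos, visited =>
    let pos' := cycleB pos
    let s := pvStringify pos'
    match visited.get? s with
    | some v => (pos', v, i, visited.items)
    | none => pvLoopB fuel (i + 1) pos' (visited.insert s i)

def big_cycle_alt (arr : List (List String)) : List (List String) × Int × Int × (List (String × Int)) :=
  pvLoopB 10000000000 1 arr (PySem.Dict.empty.insert (pvStringify arr) 0)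

-- ===== PRECONDITION & SPEC =====
-- Pre_ excludes exactly the inputs where Python A raises IndexError: an empty grid, an empty
-- first row, or a later row shorter than the first (arr[row][col] out of range); B raises there too.
def Pre_big_cycle (arr : List (List String)) : Prop :=
  arr ≠ [] ∧ arr.headD [] ≠ [] ∧ ∀ row ∈ arr, (arr.headD []).length ≤ row.length
instance (arr : List (List String)) : Decidable (Pre_big_cycle arr) := by
  unfold Pre_big_cycle; infer_instance

def pvWitness_big_cycle : List (List String) := [["O", ".", "#"], [".", "O", "."]]

def Spec_big_cycle (arr : List (List String)) (out : List (List String) × Int × Int × (List (String × Int))) : Prop := out = big_cycle_alt arr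
instance (arr : List (List String)) (out : List (List String) × Int × Int × (List (String × Int))) : Decidable (Spec_big_cycle arr out) := by unfold Spec_big_cycle; infer_instance

-- ===== CLAIM (what is proved, stated in full; the proofs are below) =====
def Claim_equal_big_cycle : Prop := ∀ (arr : List (List String)), Dom_big_cycle arr → Pre_big_cycle arr → Spec_big_cycle arr (big_cycle arr)

-- ===== LEMMAS AND PROOFS =====

def pvBuild (h w : Nat) (f : Nat → Nat → String) : List (List String) :=
  (List.range h).map (fun i => (List.range w).map (f i))

theorem pvBuild_length (h w : Nat) (f : Nat → Nat → String) : (pvBuild h w f).length = h := by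
  simp [pvBuild]

theorem pvBuild_congr {h w : Nat} {f g : Nat → Nat → String}
    (hfg : ∀ i < h, ∀ j < w, f i j = g i j) : pvBuild h w f = pvBuild h w g := by
  unfold pvBuild
  refine List.map_congr_left (fun i hi => ?_)
  exact List.map_congr_left (fun j hj => hfg i (List.mem_range.mp hi) j (List.mem_range.mp hj))

theorem pvReverse_build (h w : Nat) (f : Nat → Nat → String) :
    (pvBuild h w f).reverse = pvBuild h w (fun i => f (h - 1 - i)) := by
  apply List.ext_getElem
  · simp [pvBuild]
  · intro i h1 h2
    simp only [pvBuild, List.length_reverse, List.length_map, List.length_range] at h1 h2 ⊢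
    rw [List.getElem_reverse]
    simp [pvBuild]

theorem pvTransposeP_build0 (h : Nat) (hh : 0 < h) (f : Nat → Nat → String) :
    transposeP (pvBuild h 0 f) = [] := by
  obtain ⟨h', rfl⟩ : ∃ h', h = h' + 1 := ⟨h - 1, by omega⟩
  have : pvBuild (h' + 1) 0 f = [] :: List.replicate h' [] := by
    simp [pvBuild, List.range_succ_eq_map, List.map_map, Function.comp_def, List.map_const']
  rw [this, transposeP, dif_pos (by simp)]

theorem pvTransposeP_build (h w : Nat) (hh : 0 < h) (hw : 0 < w) (f : Nat → Nat → String) :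
    transposeP (pvBuild h w f) = pvBuild w h (fun j i => f i j) := by
  induction w generalizing f with
  | zero => omega
  | succ v ih =>
    obtain ⟨h', rfl⟩ : ∃ h', h = h' + 1 := ⟨h - 1, by omega⟩
    have hne : pvBuild (h' + 1) (v + 1) f = ((List.range (v+1)).map (f 0)) :: ((List.range h').map (fun i => (List.range (v+1)).map (f (i+1)))) := by
      simp [pvBuild, List.range_succ_eq_map, List.map_map, Function.comp]
    rw [hne, transposeP]
    have hanyF : (((List.range (v+1)).map (f 0)) :: ((List.range h').map (fun i => (List.range (v+1)).map (f (i+1))))).any (fun x => x.isEmpty) = false := by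
      simp [List.any_eq_false]
    rw [dif_neg (by simp [hanyF])]
    have hheads : List.map (fun x => x.headD "")
        (List.map (f 0) (List.range (v + 1)) ::
          List.map (fun i => List.map (f (i + 1)) (List.range (v + 1))) (List.range h')) =
        List.map (fun i => f i 0) (List.range (h' + 1)) := by
      simp [List.range_succ_eq_map, List.map_map, Function.comp]
    have htails : List.map (fun x => x.tail)
        (List.map (f 0) (List.range (v + 1)) ::
          List.map (fun i => List.map (f (i + 1)) (List.range (v + 1))) (List.range h')) =
        pvBuild (h' + 1) v (fun i j => f i (j + 1)) := by
      simp [pvBuild, List.range_succ_eq_map, List.map_map, Function.comp]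
    rw [hheads, htails]
    have hRHS : pvBuild (v + 1) (h' + 1) (fun j i => f i j) =
        (List.map (fun i => f i 0) (List.range (h' + 1))) ::
          List.map (fun j => List.map (fun i => f i (j + 1)) (List.range (h' + 1))) (List.range v) := by
      simp [pvBuild, List.range_succ_eq_map, List.map_map, Function.comp]
    rw [hRHS]
    congr 1
    rcases Nat.eq_zero_or_pos v with hv | hv
    · subst hv
      simp [pvTransposeP_build0 (h' + 1) (by omega)]
    · rw [ih hv]
      simp [pvBuild]

def pvGD (l : List String) (k : Nat) : String := l.getD k "."

def pvTl (n : Nat) (g : Nat → String) : List String := tiltCol ((List.range n).map g)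

def pvGetE (cp : List (List String)) (i j : Nat) : Option String := (cp.getD i [])[j]?

theorem pvTl_congr {n : Nat} {f g : Nat → String} (hfg : ∀ r < n, f r = g r) :
    pvTl n f = pvTl n g := by
  unfold pvTl
  congr 1
  exact List.map_congr_left (fun r hr => hfg r (List.mem_range.mp hr))

theorem pvCell_build {h w i j : Nat} {f : Nat → Nat → String} (hi : i < h) (hj : j < w) :
    pvCell (pvBuild h w f) i j = f i j := by
  simp [pvCell, pvBuild, List.getD_eq_getElem?_getD, hi, hj]

theorem pvBuild_headD {h w : Nat} {f : Nat → Nat → String} (hh : 0 < h) :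
    (pvBuild h w f).headD [] = (List.range w).map (f 0) := by
  obtain ⟨h', rfl⟩ : ∃ h', h = h' + 1 := ⟨h - 1, by omega⟩
  simp [pvBuild, List.range_succ_eq_map]

theorem tiltN_B_raw (arr : List (List String)) :
    tiltN_B arr = pvBuild arr.length (arr.headD []).length
      (fun i j => pvGD (pvTl arr.length (fun r => pvCell arr r j)) i) := by
  unfold tiltN_B pvBuild
  refine List.map_congr_left (fun i _ => ?_)
  refine List.map_congr_left (fun j hj => ?_)
  have hj' := List.mem_range.mp hj
  have : (List.map (fun j => tiltCol (List.map (fun i => pvCell arr i j) (List.range arr.length)))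
      (List.range (arr.headD []).length)).getD j [] =
      tiltCol (List.map (fun i => pvCell arr i j) (List.range arr.length)) := by
    rw [List.getD_eq_getElem?_getD, List.getElem?_map, List.getElem?_range hj']
    rfl
  rw [this]
  simp [pvGD, pvTl, List.getD_eq_getElem?_getD]

theorem tiltN_B_build {h w : Nat} (hh : 0 < h) (f : Nat → Nat → String) :
    tiltN_B (pvBuild h w f) = pvBuild h w (fun i j => pvGD (pvTl h (fun r => f r j)) i) := by
  rw [tiltN_B_raw, pvBuild_length, pvBuild_headD hh, List.length_map, List.length_range]
  refine pvBuild_congr (fun i hi j hj => ?_)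
  congr 1
  exact pvTl_congr (fun r hr => pvCell_build hr hj)

theorem rotCW_build {h w : Nat} (hh : 0 < h) (hw : 0 < w) (f : Nat → Nat → String) :
    rotCW (pvBuild h w f) = pvBuild w h (fun i j => f (h - 1 - j) i) := by
  unfold rotCW
  rw [pvReverse_build, pvTransposeP_build h w hh hw]

def pvColPartial (st : List String × Nat × Nat) : List String :=
  st.1 ++ List.replicate st.2.1 "O" ++ List.replicate st.2.2 "."

theorem pvGD_partial (o : List String) (r g i : Nat) :
    pvGD (o ++ List.replicate r "O" ++ List.replicate g ".") i =
      if i < o.length then pvGD o i else if i < o.length + r then "O" else "." := by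
  unfold pvGD
  rw [List.getD_eq_getElem?_getD]
  simp only [List.getElem?_append, List.getElem?_replicate, List.length_append,
    List.length_replicate]
  split_ifs <;> first | omega | simp [List.getD_eq_getElem?_getD]

theorem pvGD_snoc (l : List String) (x : String) (i : Nat) :
    pvGD (l ++ [x]) i = if i < l.length then pvGD l i else if i = l.length then x else "." := by
  unfold pvGD
  rw [List.getD_eq_getElem?_getD, List.getElem?_append]
  by_cases h1 : i < l.length
  · simp [h1, List.getD_eq_getElem?_getD]
  · by_cases h2 : i = l.length
    · subst h2
      simp
    · rw [if_neg h1, if_neg h1, if_neg h2, List.getElem?_singleton, if_neg (by omega)]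
      rfl

theorem pvGetE_modify_set (cp : List (List String)) (b c : Nat) (v : String) (i j : Nat) :
    pvGetE (cp.modify b (fun row => row.set c v)) i j =
      if i = b ∧ j = c ∧ b < cp.length ∧ c < (cp.getD b []).length then some v
      else pvGetE cp i j := by
  have key : ((cp.modify b fun row => row.set c v).getD i []) =
      if b = i ∧ i < cp.length then (cp.getD i []).set c v else cp.getD i [] := by
    rw [List.getD_eq_getElem?_getD, List.getElem?_modify]
    by_cases hb : i < cp.length
    · rw [List.getElem?_eq_getElem hb]
      have hgd : cp.getD i [] = cp[i] := by
        rw [List.getD_eq_getElem?_getD, List.getElem?_eq_getElem hb]; rfl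
      have hred : (((fun a => if b = i then a.set c v else a) <$> some cp[i]).getD []
          : List String) = if b = i then cp[i].set c v else cp[i] := rfl
      rw [hred, hgd]
      by_cases hbi : b = i
      · rw [if_pos hbi, if_pos ⟨hbi, hb⟩]
      · rw [if_neg hbi, if_neg (by rintro ⟨h1, -⟩; exact hbi h1)]
    · rw [List.getElem?_eq_none (by omega)]
      have hred2 : (((fun a => if b = i then a.set c v else a) <$> (none : Option (List String))).getD []
          : List String) = [] := rfl
      rw [hred2, if_neg (by rintro ⟨-, h⟩; exact hb h), List.getD_eq_getElem?_getD,
        List.getElem?_eq_none (by omega)]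
      rfl
  unfold pvGetE
  rw [key]
  by_cases hcond : b = i ∧ i < cp.length
  · obtain ⟨hbi, hilen⟩ := hcond
    subst hbi
    rw [if_pos ⟨rfl, hilen⟩, List.getElem?_set]
    by_cases hjc : j = c
    · subst hjc
      by_cases hcl : j < (cp.getD b []).length
      · rw [if_pos rfl, if_pos hcl, if_pos ⟨rfl, rfl, hilen, hcl⟩]
      · rw [if_pos rfl, if_neg hcl, if_neg (by rintro ⟨-, -, -, hc⟩; exact hcl hc)]
        exact (List.getElem?_eq_none (by omega)).symm
    · rw [if_neg (fun h : c = j => hjc h.symm), if_neg (by rintro ⟨-, h, -⟩; exact hjc h)]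
  · rw [if_neg hcond, if_neg (by rintro ⟨h1, -, h3, -⟩; exact hcond ⟨h1.symm, by omega⟩)]

theorem pvRowLen_modify_set (cp : List (List String)) (b c : Nat) (v : String) (i : Nat) :
    ((cp.modify b (fun row => row.set c v)).getD i []).length = (cp.getD i []).length := by
  rw [List.getD_eq_getElem?_getD, List.getD_eq_getElem?_getD, List.getElem?_modify]
  rcases h : cp[i]? with _ | row
  · rfl
  · by_cases hbi : b = i <;> simp [hbi]

def pvAst (arr : List (List String)) (c k : Nat) (cp : List (List String)) :
    Nat × List (List String) :=
  (List.range k).foldl (tiltNstep arr c) (0, cp)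

def pvBst (arr : List (List String)) (c k : Nat) : List String × Nat × Nat :=
  ((List.range k).map (fun r => pvCell arr r c)).foldl tiltColStep ([], 0, 0)

theorem pvAst_succ (arr : List (List String)) (c k : Nat) (cp : List (List String)) :
    pvAst arr c (k + 1) cp = tiltNstep arr c (pvAst arr c k cp) k := by
  simp [pvAst, List.range_succ]

theorem pvBst_succ (arr : List (List String)) (c k : Nat) :
    pvBst arr c (k + 1) = tiltColStep (pvBst arr c k) (pvCell arr k c) := by
  simp [pvBst, List.range_succ]

theorem pv_inner (arr : List (List String)) (c h : Nat) (cp : List (List String))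
    (hlen : h ≤ cp.length)
    (hrow : ∀ i, i < h → c < (cp.getD i []).length)
    (hdot : ∀ i, i < h → pvGetE cp i c = some ".") :
    ∀ k, k ≤ h →
      (pvAst arr c k cp).1 = (pvBst arr c k).1.length + (pvBst arr c k).2.1 ∧
      (pvBst arr c k).1.length + (pvBst arr c k).2.1 + (pvBst arr c k).2.2 = k ∧
      (pvAst arr c k cp).2.length = cp.length ∧
      (∀ i, ((pvAst arr c k cp).2.getD i []).length = (cp.getD i []).length) ∧
      (∀ i j, j ≠ c → pvGetE (pvAst arr c k cp).2 i j = pvGetE cp i j) ∧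
      (∀ i, k ≤ i → pvGetE (pvAst arr c k cp).2 i c = pvGetE cp i c) ∧
      (∀ i, i < k → pvGetE (pvAst arr c k cp).2 i c =
        some (pvGD (pvColPartial (pvBst arr c k)) i)) := by
  intro k
  induction k with
  | zero =>
    intro _
    refine ⟨rfl, rfl, rfl, fun i => rfl, fun i j _ => rfl, fun i _ => rfl, fun i hi => absurd hi (by omega)⟩
  | succ k ih =>
    intro hk1
    obtain ⟨ih1, ih2, ih3, ih4, ih5, ih6, ih7⟩ := ih (by omega)
    have hkh : k < h := by omega
    rw [pvAst_succ, pvBst_succ]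
    set a := pvAst arr c k cp with ha
    set b := pvBst arr c k with hb
    by_cases heO : pvCell arr k c = "O"
    · have hstep : tiltNstep arr c a k = (a.1 + 1, a.2.modify a.1 (fun row => row.set c "O")) := by
        simp [tiltNstep, heO]
      have hbstep : tiltColStep b (pvCell arr k c) = (b.1, b.2.1 + 1, b.2.2) := by
        simp [tiltColStep, heO]
      rw [hstep, hbstep]
      have hbase : a.1 < h := by omega
      have hcnd : ∀ i : Nat, (i = a.1 ∧ c = c ∧ a.1 < a.2.length ∧ c < (a.2.getD a.1 []).length) ↔ i = a.1 := by
        intro i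
        constructor
        · rintro ⟨h, -⟩; exact h
        · rintro rfl
          exact ⟨rfl, rfl, by rw [ih3]; omega, by rw [ih4]; exact hrow a.1 hbase⟩
      refine ⟨by simpa using by omega, by simpa using by omega, ?_, ?_, ?_, ?_, ?_⟩
      · simpa [List.length_modify] using ih3
      · intro i
        rw [pvRowLen_modify_set]
        exact ih4 i
      · intro i j hj
        rw [pvGetE_modify_set, if_neg (by rintro ⟨-, h, -⟩; exact hj h)]
        exact ih5 i j hj
      · intro i hi
        rw [pvGetE_modify_set, if_neg (by rintro ⟨h, -⟩; omega)]
        exact ih6 i (by omega)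
      · intro i hi
        rw [pvGetE_modify_set]
        by_cases hia : i = a.1
        · rw [if_pos ((hcnd i).mpr hia)]
          simp only [pvColPartial, pvGD_partial]
          rw [if_neg (by omega), if_pos (by omega)]
        · rw [if_neg (fun h => hia ((hcnd i).mp h))]
          by_cases hik : i < k
          · rw [ih7 i hik]
            simp only [pvColPartial, pvGD_partial]
            split_ifs <;> first | rfl | (exfalso; omega)
          · have hik' : i = k := by omega
            subst hik'
            rw [ih6 i le_rfl, hdot i hkh]
            simp only [pvColPartial, pvGD_partial]
            rw [if_neg (by omega), if_neg (by omega)]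
    · by_cases heH : pvCell arr k c = "#"
      · have hstep : tiltNstep arr c a k = (k + 1, a.2.modify k (fun row => row.set c "#")) := by
          simp [tiltNstep, heO, heH]
        have hbstep : tiltColStep b (pvCell arr k c) =
            (b.1 ++ List.replicate b.2.1 "O" ++ List.replicate b.2.2 "." ++ ["#"], 0, 0) := by
          simp [tiltColStep, heO, heH]
        rw [hstep, hbstep]
        have hplen : (b.1 ++ List.replicate b.2.1 "O" ++ List.replicate b.2.2 ".").length = k := by
          simp only [List.length_append, List.length_replicate]; omega
        refine ⟨?_, ?_, ?_, ?_, ?_, ?_, ?_⟩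
        · simp only [List.length_append, List.length_replicate, List.length_singleton]; omega
        · simp only [List.length_append, List.length_replicate, List.length_singleton]; omega
        · simpa [List.length_modify] using ih3
        · intro i
          rw [pvRowLen_modify_set]
          exact ih4 i
        · intro i j hj
          rw [pvGetE_modify_set, if_neg (by rintro ⟨-, h, -⟩; exact hj h)]
          exact ih5 i j hj
        · intro i hi
          rw [pvGetE_modify_set, if_neg (by rintro ⟨h, -⟩; omega)]
          exact ih6 i (by omega)
        · intro i hi
          rw [pvGetE_modify_set]
          have hpc : pvColPartial (b.1 ++ List.replicate b.2.1 "O" ++ List.replicate b.2.2 "." ++ ["#"], 0, 0)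
              = (b.1 ++ List.replicate b.2.1 "O" ++ List.replicate b.2.2 ".") ++ ["#"] := by
            simp [pvColPartial]
          rw [hpc, pvGD_snoc, hplen]
          by_cases hik : i = k
          · subst hik
            rw [if_pos ⟨rfl, rfl, by omega, by rw [ih4]; exact hrow i hkh⟩, if_neg (by omega), if_pos rfl]
          · rw [if_neg (by rintro ⟨h, -⟩; exact hik h), if_pos (by omega)]
            have := ih7 i (by omega)
            rw [this]
            simp [pvColPartial]
      · have hstep : tiltNstep arr c a k = a := by
          simp [tiltNstep, heO, heH]
        have hbstep : tiltColStep b (pvCell arr k c) = (b.1, b.2.1, b.2.2 + 1) := by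
          simp [tiltColStep, heO, heH]
        rw [hstep, hbstep]
        refine ⟨by simpa using by omega, by simpa using by omega, ih3, ih4, ih5, ?_, ?_⟩
        · intro i hi
          exact ih6 i (by omega)
        · intro i hi
          by_cases hik : i < k
          · rw [ih7 i hik]
            simp only [pvColPartial, pvGD_partial]
          · have hik' : i = k := by omega
            subst hik'
            rw [ih6 i le_rfl, hdot i hkh]
            simp only [pvColPartial, pvGD_partial]
            rw [if_neg (by omega), if_neg (by omega)]

def pvG0 (h w : Nat) : List (List String) :=
  List.replicate h (List.replicate w ".")

def pvOuter (arr : List (List String)) (m : Nat) : List (List String) :=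
  (List.range m).foldl
    (fun cp c => ((List.range arr.length).foldl (tiltNstep arr c) (0, cp)).2)
    (pvG0 arr.length (arr.headD []).length)

theorem pvG0_getD (h w i : Nat) :
    (pvG0 h w).getD i [] = if i < h then List.replicate w "." else [] := by
  unfold pvG0
  rw [List.getD_eq_getElem?_getD, List.getElem?_replicate]
  by_cases hi : i < h <;> simp [hi]

theorem pvGetE_G0 (h w i j : Nat) :
    pvGetE (pvG0 h w) i j = if i < h ∧ j < w then some "." else none := by
  unfold pvGetE
  rw [pvG0_getD]
  by_cases hi : i < h
  · rw [if_pos hi, List.getElem?_replicate]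
    by_cases hj : j < w
    · rw [if_pos hj, if_pos ⟨hi, hj⟩]
    · rw [if_neg hj, if_neg (by rintro ⟨-, h⟩; exact hj h)]
  · rw [if_neg hi, if_neg (by rintro ⟨h, -⟩; exact hi h)]
    rfl

theorem pvOuter_succ (arr : List (List String)) (m : Nat) :
    pvOuter arr (m + 1) = (pvAst arr m arr.length (pvOuter arr m)).2 := by
  simp [pvOuter, pvAst, List.range_succ]

theorem pv_outer_inv (arr : List (List String)) :
    ∀ m, m ≤ (arr.headD []).length →
      (pvOuter arr m).length = arr.length ∧
      (∀ i, ((pvOuter arr m).getD i []).length =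
        ((pvG0 arr.length (arr.headD []).length).getD i []).length) ∧
      (∀ i j, m ≤ j → pvGetE (pvOuter arr m) i j =
        pvGetE (pvG0 arr.length (arr.headD []).length) i j) ∧
      (∀ i j, i < arr.length → j < m → pvGetE (pvOuter arr m) i j =
        some (pvGD (pvTl arr.length (fun r => pvCell arr r j)) i)) := by
  intro m
  induction m with
  | zero =>
    intro _
    exact ⟨by simp [pvOuter, pvG0], fun i => rfl, fun i j _ => rfl,
      fun i j _ hj => absurd hj (by omega)⟩
  | succ m ih =>
    intro hm1
    obtain ⟨ih1, ih2, ih3, ih4⟩ := ih (by omega)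
    have hw' : m < (arr.headD []).length := by omega
    have hrowlen : ∀ i, i < arr.length →
        ((pvOuter arr m).getD i []).length = (arr.headD []).length := by
      intro i hi
      rw [ih2, pvG0_getD, if_pos hi, List.length_replicate]
    obtain ⟨c1, c2, c3, c4, c5, c6, c7⟩ :=
      pv_inner arr m arr.length (pvOuter arr m)
        (by rw [ih1])
        (by intro i hi; rw [hrowlen i hi]; omega)
        (by
          intro i hi
          rw [ih3 i m le_rfl, pvGetE_G0, if_pos ⟨hi, hw'⟩])
        arr.length le_rfl
    rw [pvOuter_succ]
    refine ⟨by rw [c3, ih1], ?_, ?_, ?_⟩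
    · intro i
      rw [c4 i, ih2 i]
    · intro i j hj
      rw [c5 i j (by omega), ih3 i j (by omega)]
    · intro i j hi hj
      by_cases hjm : j = m
      · subst hjm
        rw [c7 i hi]
        congr 1
      · rw [c5 i j hjm, ih4 i j hi (by omega)]

theorem pvGetE_eq_some (l : List (List String)) (i j : Nat) (hi : i < l.length)
    (hj : j < l[i].length) : pvGetE l i j = some l[i][j] := by
  unfold pvGetE
  rw [List.getD_eq_getElem?_getD, List.getElem?_eq_getElem hi]
  exact List.getElem?_eq_getElem hj

theorem pv_tiltNA_eq_tiltNB (arr : List (List String)) : tiltN_A arr = tiltN_B arr := by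
  have hA : tiltN_A arr = pvOuter arr (arr.headD []).length := rfl
  rw [hA, tiltN_B_raw]
  obtain ⟨o1, o2, o3, o4⟩ := pv_outer_inv arr (arr.headD []).length le_rfl
  have hrowlen : ∀ i, i < arr.length →
      ((pvOuter arr (arr.headD []).length).getD i []).length = (arr.headD []).length := by
    intro i hi
    rw [o2, pvG0_getD, if_pos hi, List.length_replicate]
  apply List.ext_getElem
  · rw [o1, pvBuild_length]
  · intro i h1 h2
    have hih : i < arr.length := by rw [o1] at h1; exact h1
    have hgdi : (pvOuter arr (arr.headD []).length).getD i [] =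
        (pvOuter arr (arr.headD []).length)[i] := by
      rw [List.getD_eq_getElem?_getD, List.getElem?_eq_getElem h1]
      rfl
    apply List.ext_getElem
    · rw [← hgdi, hrowlen i hih]
      simp [pvBuild, List.getElem_map]
    · intro j hj1 hj2
      have hjw : j < (arr.headD []).length := by rw [← hgdi, hrowlen i hih] at hj1; exact hj1
      have := o4 i j hih hjw
      rw [pvGetE_eq_some _ i j h1 hj1] at this
      rw [Option.some_inj.mp this]
      simp [pvBuild]

theorem pv_cycleA_eq_cycleB (arr : List (List String)) : cycleA arr = cycleB arr := by
  have hcycB : cycleB arr = rotCW (tiltN_B (rotCW (tiltN_B (rotCW (tiltN_B (rotCW (tiltN_B arr))))))) := by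
    simp [cycleB, List.range_succ]
  have htrnil : transposeP [] = [] := by rw [transposeP]
  have hrotnil : rotCW [] = [] := by simp [rotCW, htrnil]
  have hNnil : tiltN_B ([] : List (List String)) = [] := by simp [tiltN_B]
  rcases Nat.eq_zero_or_pos arr.length with hh | hh
  · have harr : arr = [] := List.eq_nil_of_length_eq_zero hh
    subst harr
    simp [cycleA, tiltE_A, tiltS_A, tiltW_A, pv_tiltNA_eq_tiltNB, hcycB, hNnil, htrnil, hrotnil]
  rcases Nat.eq_zero_or_pos (arr.headD []).length with hw | hw
  · -- width 0: every tilt/rotation collapses to [] on both sides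
    have hB : tiltN_B arr = pvBuild arr.length 0
        (fun i j => pvGD (pvTl arr.length (fun r => pvCell arr r j)) i) := by
      rw [tiltN_B_raw, hw]
    have h1 : transposeP (tiltN_B arr) = [] := by rw [hB]; exact pvTransposeP_build0 _ hh _
    have h2 : rotCW (tiltN_B arr) = [] := by
      rw [hB, rotCW, pvReverse_build]; exact pvTransposeP_build0 _ hh _
    simp only [cycleA, tiltE_A, tiltS_A, tiltW_A, pv_tiltNA_eq_tiltNB, hcycB, h1, h2, hNnil,
      htrnil, hrotnil, List.reverse_nil]
  · -- main case: both sides normalize to the same pvBuild normal form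
    simp only [cycleA, tiltE_A, tiltS_A, tiltW_A, hcycB]
    simp only [pv_tiltNA_eq_tiltNB]
    rw [tiltN_B_raw arr]
    simp only [pvTransposeP_build arr.length (arr.headD []).length hh hw,
      pvTransposeP_build (arr.headD []).length arr.length hw hh,
      tiltN_B_build hh, tiltN_B_build hw, rotCW_build hh hw, rotCW_build hw hh,
      pvReverse_build]

theorem pv_loop_eq (fuel : Nat) (i : Int) (pos : List (List String))
    (visited : PySem.Dict String Int) : pvLoopA fuel i pos visited = pvLoopB fuel i pos visited := by
  induction fuel generalizing i pos visited with
  | zero => rfl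
  | succ n ih =>
    simp only [pvLoopA, pvLoopB, pv_cycleA_eq_cycleB]
    cases (visited.get? (pvStringify (cycleB pos))) with
    | none => exact ih _ _ _
    | some v => rfl

-- ===== VERDICT (by name: the statement is the Claim_ definition above) =====
theorem big_cycle_spec : Claim_equal_big_cycle := by
  intro arr _ _
  unfold Spec_big_cycle big_cycle big_cycle_alt
  exact pv_loop_eq _ _ _ _
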